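-- pv_equiv track=rewrite | github.com/rsktbob/NTUT_PY_Project | temp26.py | function6
-- ===== SOURCE A (Python) =====
-- def function6(card2):
--     for i in range(1,18):
--         if  card2.count(i)==2:
--             for k in range(i+1,18):
--                 if  card2.count(k)==3:
--                     return 1
--         if  card2.count(i)==3:
--             for k in range(i+1,18):
--                 if  card2.count(k)==2:
--                     return 1
-- ===== SOURCE B (Python) =====
-- def function6(card2):
--     vals = [v for v in card2 if 1 <= v <= 17]
--     counts = {}
--     for v in vals:
--         counts[v] = counts.get(v, 0) + 1
--     runs = set(counts.values())
--     if 2 in runs and 3 in runs: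
--         return 1
-- ===== Notes on version B (the rewrite author's own statement) =====
-- stated objective: faster
-- what changed: Replaces A's nested range loops with repeated card2.count scans (up to hundreds of full-list scans) by one pass building a dict of counts of the in-range values, then a single check whether both 2 and 3 occur among the counts.
import Mathlib
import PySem

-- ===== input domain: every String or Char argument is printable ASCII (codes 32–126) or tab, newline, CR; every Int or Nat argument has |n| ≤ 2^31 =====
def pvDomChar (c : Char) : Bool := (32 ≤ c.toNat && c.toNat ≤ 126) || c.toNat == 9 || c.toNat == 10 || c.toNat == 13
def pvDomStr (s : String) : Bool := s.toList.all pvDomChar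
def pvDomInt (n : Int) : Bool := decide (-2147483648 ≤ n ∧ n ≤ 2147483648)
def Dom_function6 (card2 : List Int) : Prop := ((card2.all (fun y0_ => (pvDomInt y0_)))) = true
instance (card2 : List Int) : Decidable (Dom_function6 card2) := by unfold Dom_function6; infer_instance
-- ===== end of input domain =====

-- B replaces A's nested range loops with repeated full-list .count scans by one
-- counting pass over the in-range values plus a membership check on the multiplicities (faster by a constant factor).


-- ===== PORT A =====
-- inner loop 'for k in range(i+1,18): if card2.count(k)==t: return 1' (t = 3 resp. 2)
def f6Inner (card2 : List Int) (ks : List Int) (t : Nat) : Option Int :=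
  match ks with
  | [] => none
  | k :: rest => if PySem.List.count card2 k = t then some 1 else f6Inner card2 rest t

-- outer loop 'for i in range(1,18): …' with the two guarded inner loops, early return
def f6Outer (card2 : List Int) (is : List Int) : Option Int :=
  match is with
  | [] => none
  | i :: rest =>
    match (if PySem.List.count card2 i = 2 then f6Inner card2 (PySem.List.pyRange (i+1) 18 1) 3 else none) with
    | some r => some r
    | none =>
      match (if PySem.List.count card2 i = 3 then f6Inner card2 (PySem.List.pyRange (i+1) 18 1) 2 else none) with
      | some r => some r
      | none => f6Outer card2 rest

def function6 (card2 : List Int) : Option Int :=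
  f6Outer card2 (PySem.List.pyRange 1 18 1)

-- ===== PORT B =====
def function6_alt (card2 : List Int) : Option Int :=
  let vals := card2.filter (fun v => decide (1 ≤ v ∧ v ≤ 17))
  let counts := vals.foldl (fun d v => d.insert v (d.getD v 0 + 1)) PySem.Dict.empty
  let runs : PySem.Set Int := PySem.Set.ofList counts.values
  if (2 : Int) ∈ runs ∧ (3 : Int) ∈ runs then some 1 else none

-- ===== PRECONDITION & SPEC =====
def Spec_function6 (card2 : List Int) (out : Option Int) : Prop := out = function6_alt card2
instance (card2 : List Int) (out : Option Int) : Decidable (Spec_function6 card2 out) := by unfold Spec_function6; infer_instance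

-- ===== CLAIM (what is proved, stated in full; the proofs are below) =====
def Claim_equal_function6 : Prop := ∀ (card2 : List Int), Dom_function6 card2 → Spec_function6 card2 (function6 card2)

-- ===== LEMMAS AND PROOFS =====

-- 'card2 contains some value in 1..17 occurring exactly c times'
def HasCnt (card2 : List Int) (c : Nat) : Prop :=
  ∃ v : Int, 1 ≤ v ∧ v ≤ 17 ∧ List.count v card2 = c

theorem f6Inner_shape (card2 ks : List Int) (t : Nat) :
    f6Inner card2 ks t = none ∨ f6Inner card2 ks t = some 1 := by
  induction ks with
  | nil => left; rfl
  | cons k rest ih =>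
    by_cases h : List.count k card2 = t
    · right; simp [f6Inner, PySem.List.count_eq, h]
    · simpa [f6Inner, PySem.List.count_eq, h] using ih

theorem f6Inner_some_iff (card2 ks : List Int) (t : Nat) :
    f6Inner card2 ks t = some 1 ↔ ∃ k ∈ ks, List.count k card2 = t := by
  induction ks with
  | nil => simp [f6Inner]
  | cons k rest ih =>
    by_cases h : List.count k card2 = t <;>
      simp [f6Inner, PySem.List.count_eq, h, ih, List.mem_cons]

theorem f6Outer_cons (card2 : List Int) (i : Int) (rest : List Int) :
    f6Outer card2 (i :: rest) = some 1 ↔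
      (List.count i card2 = 2 ∧ f6Inner card2 (PySem.List.pyRange (i+1) 18 1) 3 = some 1) ∨
      (List.count i card2 = 3 ∧ f6Inner card2 (PySem.List.pyRange (i+1) 18 1) 2 = some 1) ∨
      f6Outer card2 rest = some 1 := by
  rcases f6Inner_shape card2 (PySem.List.pyRange (i+1) 18 1) 3 with hs3 | hs3 <;>
    rcases f6Inner_shape card2 (PySem.List.pyRange (i+1) 18 1) 2 with hs2 | hs2 <;>
    by_cases h2 : List.count i card2 = 2 <;>
    by_cases h3 : List.count i card2 = 3 <;>
    first
      | omega
      | simp [f6Outer, PySem.List.count_eq, h2, h3, hs3, hs2]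

theorem f6Outer_some_iff (card2 is : List Int) :
    f6Outer card2 is = some 1 ↔
      ∃ i ∈ is,
        (List.count i card2 = 2 ∧ ∃ k ∈ PySem.List.pyRange (i+1) 18 1, List.count k card2 = 3) ∨
        (List.count i card2 = 3 ∧ ∃ k ∈ PySem.List.pyRange (i+1) 18 1, List.count k card2 = 2) := by
  induction is with
  | nil => simp [f6Outer]
  | cons i rest ih =>
    rw [f6Outer_cons, ih, f6Inner_some_iff, f6Inner_some_iff, List.exists_mem_cons_iff]
    exact or_assoc.symm

theorem function6_some_iff (card2 : List Int) :
    function6 card2 = some 1 ↔ HasCnt card2 2 ∧ HasCnt card2 3 := by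
  rw [function6, f6Outer_some_iff]
  constructor
  · rintro ⟨i, hi, hcase⟩
    rw [PySem.List.mem_pyRange_one] at hi
    rcases hcase with ⟨h2, k, hk, hk3⟩ | ⟨h3, k, hk, hk2⟩ <;>
      rw [PySem.List.mem_pyRange_one] at hk
    · exact ⟨⟨i, by omega, by omega, h2⟩, ⟨k, by omega, by omega, hk3⟩⟩
    · exact ⟨⟨k, by omega, by omega, hk2⟩, ⟨i, by omega, by omega, h3⟩⟩
  · rintro ⟨⟨a, ha1, ha2, ha3⟩, ⟨b, hb1, hb2, hb3⟩⟩
    have hab : a ≠ b := by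
      intro h; rw [h] at ha3; rw [ha3] at hb3; exact absurd hb3 (by omega)
    rcases lt_or_gt_of_ne hab with hlt | hgt
    · exact ⟨a, PySem.List.mem_pyRange_one.mpr ⟨by omega, by omega⟩,
        Or.inl ⟨ha3, b, PySem.List.mem_pyRange_one.mpr ⟨by omega, by omega⟩, hb3⟩⟩
    · exact ⟨b, PySem.List.mem_pyRange_one.mpr ⟨by omega, by omega⟩,
        Or.inr ⟨hb3, a, PySem.List.mem_pyRange_one.mpr ⟨by omega, by omega⟩, ha3⟩⟩

theorem mem_vals_count_iff (card2 : List Int) (c : Nat) (hc : 0 < c) :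
    (∃ k ∈ card2.filter (fun v => decide (1 ≤ v ∧ v ≤ 17)),
        List.count k (card2.filter (fun v => decide (1 ≤ v ∧ v ≤ 17))) = c) ↔
      HasCnt card2 c := by
  constructor
  · rintro ⟨k, hk, hkc⟩
    rw [List.mem_filter] at hk
    have hp : (fun v => decide (1 ≤ v ∧ v ≤ 17)) k = true := hk.2
    have hcf := List.count_filter (p := fun v => decide (1 ≤ v ∧ v ≤ 17)) (a := k) (l := card2) hp
    simp only [decide_eq_true_eq] at hp
    exact ⟨k, hp.1, hp.2, by omega⟩
  · rintro ⟨v, hv1, hv2, hv3⟩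
    have hp : (fun w => decide (1 ≤ w ∧ w ≤ 17)) v = true := by simp [hv1, hv2]
    have hmem : v ∈ card2 := by rw [← List.count_pos_iff]; omega
    have hcf := List.count_filter (p := fun v => decide (1 ≤ v ∧ v ≤ 17)) (a := v) (l := card2) hp
    exact ⟨v, List.mem_filter.mpr ⟨hmem, hp⟩, by omega⟩

theorem function6_alt_some_iff (card2 : List Int) :
    function6_alt card2 = some 1 ↔ HasCnt card2 2 ∧ HasCnt card2 3 := by
  have h2 := mem_vals_count_iff card2 2 (by omega)
  have h3 := mem_vals_count_iff card2 3 (by omega)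
  rw [function6_alt]
  simp only [PySem.Dict.foldl_insert_getD_add_one_eq_counter, PySem.Dict.values,
    PySem.Dict.items_counter, List.map_map, Function.comp_def,
    PySem.Set.mem_ofList, List.mem_map]
  split_ifs with hif
  · refine iff_of_true rfl ?_
    obtain ⟨⟨k2, hk2, he2⟩, ⟨k3, hk3, he3⟩⟩ := hif
    exact ⟨h2.mp ⟨k2, hk2, by exact_mod_cast he2⟩, h3.mp ⟨k3, hk3, by exact_mod_cast he3⟩⟩
  · refine iff_of_false (by simp) ?_
    rintro ⟨hc2, hc3⟩
    obtain ⟨k2, hk2, he2⟩ := h2.mpr hc2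
    obtain ⟨k3, hk3, he3⟩ := h3.mpr hc3
    exact hif ⟨⟨k2, hk2, by exact_mod_cast congrArg (Nat.cast : Nat → Int) he2⟩,
               ⟨k3, hk3, by exact_mod_cast congrArg (Nat.cast : Nat → Int) he3⟩⟩

theorem f6Outer_shape (card2 : List Int) :
    function6 card2 = none ∨ function6 card2 = some 1 := by
  rw [function6]
  generalize PySem.List.pyRange 1 18 1 = is
  induction is with
  | nil => left; rfl
  | cons i rest ih =>
    rcases ih with hr | hr
    · rcases f6Inner_shape card2 (PySem.List.pyRange (i+1) 18 1) 3 with hs3 | hs3 <;>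
        rcases f6Inner_shape card2 (PySem.List.pyRange (i+1) 18 1) 2 with hs2 | hs2 <;>
        by_cases h2 : List.count i card2 = 2 <;>
        by_cases h3 : List.count i card2 = 3 <;>
        first
          | omega
          | simp [f6Outer, PySem.List.count_eq, h2, h3, hs3, hs2, hr]
    · right
      rw [f6Outer_cons]; tauto

theorem function6_alt_shape (card2 : List Int) :
    function6_alt card2 = none ∨ function6_alt card2 = some 1 := by
  rw [function6_alt]
  split_ifs <;> simp

-- ===== VERDICT (by name: the statement is the Claim_ definition above) =====
theorem function6_spec : Claim_equal_function6 := by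
  intro card2 _
  unfold Spec_function6
  rcases f6Outer_shape card2 with hA | hA
  · rcases function6_alt_shape card2 with hB | hB
    · rw [hA, hB]
    · exfalso
      have hAs : function6 card2 = some 1 :=
        (function6_some_iff card2).mpr ((function6_alt_some_iff card2).mp hB)
      rw [hA] at hAs; simp at hAs
  · rw [hA, (function6_alt_some_iff card2).mpr ((function6_some_iff card2).mp hA)]
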